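-- pv_equiv track=rewrite | github.com/vjardimb/ros | main.py | find_biggest_sublist
-- ===== SOURCE A (Python) =====
-- def find_biggest_sublist(big_list, size):
--     '''
--     Function responsible for finding the sublist whose sum of values is the largest within the main list.
--     Returns the position that this sublist is in the large list. Example: [12, 0 , 2, 3, 35, 45, 10, 6],
--     the largest 3-element sublist found would be [ 35, 45, 10], with position = 4.
--     It will be used in the third problem. The main list represents the range of distances seen by the robot,
--     the small list represents the space taken by the robot when walking in this direction.
--     '''
--     # Intializes current biggest sum
--     biggest_sum = 0
--     # Intializes current position of list with biggest sum
--     biggest_sum_pos = 0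
--     # Intializes current list with biggest sum
--     biggest_list = [0 for i in range(size)]
--
--     # Loops overs big_list and finds the position of list with biggest sum
--     for i,item in enumerate(big_list[:-size+1]):
--         small_list = big_list[i:i+size]
--         addition = sum(small_list)
--         if addition > biggest_sum and max(small_list)-min(small_list)<1.5:
--             biggest_sum = addition
--             biggest_sum_pos = i
--             biggest_list = small_list
--
--     # Post a new message in the topic to which we are subscribed containing the new angular and linear velocities
--     return biggest_sum_pos
-- ===== SOURCE B (Python) =====
-- def find_biggest_sublist(big_list, size):
--     # O(n) sliding window: running sum + an amortized-O(1) min/max queue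
--     # built from two stacks whose entries carry running max/min.
--     best_sum = 0
--     best_pos = 0
--     if size < 1:
--         return best_pos
--     win_sum = 0
--     front = []  # top = oldest window element; entry (value, mx, mn) covers itself and entries below
--     back = []   # top = newest window element; entry (value, mx, mn) covers itself and entries below
--     for r, x in enumerate(big_list):
--         if back:
--             _, bmx, bmn = back[-1]
--             back.append((x, x if x > bmx else bmx, x if x < bmn else bmn))
--         else:
--             back.append((x, x, x))
--         win_sum += x
--         if r >= size - 1:
--             if not front:
--                 while back:
--                     y, _, _ = back.pop()
--                     if front:
--                         _, fmx, fmn = front[-1]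
--                         front.append((y, y if y > fmx else fmx, y if y < fmn else fmn))
--                     else:
--                         front.append((y, y, y))
--             _, wmx, wmn = front[-1]
--             if back:
--                 _, bmx, bmn = back[-1]
--                 wmx = bmx if bmx > wmx else wmx
--                 wmn = bmn if bmn < wmn else wmn
--             if win_sum > best_sum and wmx - wmn < 1.5:
--                 best_sum = win_sum
--                 best_pos = r - size + 1
--             out, _, _ = front.pop()
--             win_sum -= out
--     return best_pos
-- ===== Notes on version B (the rewrite author's own statement) =====
-- stated objective: faster
-- what changed: Replaced the per-window sum/max/min rescans with one pass keeping a running window sum and a two-stack monotonic queue whose entries carry running max/min, so each window's sum, max and min are read in O(1) amortized.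
-- intended difference: For size == 1 A's slice big_list[:-size+1] == big_list[:0] is empty so A always returns 0, while B returns the position of the best single-element window (the intended value); they differ exactly when some later element exceeds both 0 and the first element. — e.g. on find_biggest_sublist([0, 1], 1): A returns 0, B returns 1
-- outside the precondition, e.g. on find_biggest_sublist([3, 1, 2, 2, 5], -2): A returns 1, B returns 0
import Mathlib
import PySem

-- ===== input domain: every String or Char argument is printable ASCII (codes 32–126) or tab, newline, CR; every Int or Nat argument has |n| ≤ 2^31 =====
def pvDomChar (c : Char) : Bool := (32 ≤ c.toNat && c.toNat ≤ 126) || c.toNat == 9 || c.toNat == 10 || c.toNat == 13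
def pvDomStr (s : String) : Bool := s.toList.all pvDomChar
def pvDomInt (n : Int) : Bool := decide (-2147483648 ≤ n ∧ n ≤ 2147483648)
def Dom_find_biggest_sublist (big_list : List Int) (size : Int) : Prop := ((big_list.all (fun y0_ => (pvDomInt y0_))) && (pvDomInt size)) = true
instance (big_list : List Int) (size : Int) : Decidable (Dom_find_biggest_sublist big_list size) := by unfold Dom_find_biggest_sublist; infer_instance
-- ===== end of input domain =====

-- B replaces A's per-window sum/max/min rescans by one pass with a running window sum and a
-- two-stack monotonic queue carrying running max/min (O(n) instead of O(n*size)); B returns the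
-- intended position for size = 1 where A's empty slice makes it always return 0 (see D_ below).

-- ===== PORT A =====
def find_biggest_sublist (big_list : List Int) (size : Int) : Int :=
  -- biggest_sum = 0; biggest_sum_pos = 0; biggest_list = [0 for i in range(size)]
  let init : Int × Int × List Int := (0, 0, (PySem.List.pyRange 0 size 1).map (fun _ => (0 : Int)))
  -- for i, item in enumerate(big_list[:-size+1]): ...
  let r := (PySem.List.enumerate (PySem.List.slice big_list none (some (-size + 1))) 0).foldl
    (fun st p =>
      let i := p.1
      let small_list := PySem.List.slice big_list (some i) (some (i + size))
      let addition := small_list.sum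
      -- 'max(small_list)-min(small_list) < 1.5' ported as '... ≤ 1' (exact: the difference is an Int).
      -- The '.getD 0' defaults are unreachable exactly where Python's short-circuit 'and' keeps
      -- max()/min() from being called on an empty list (addition > biggest_sum fails there).
      if addition > st.1 ∧ (PySem.List.max? small_list (fun y => y)).getD 0
                           - (PySem.List.min? small_list (fun y => y)).getD 0 ≤ 1
      then (addition, i, small_list) else st) init
  r.2.1

-- ===== PORT B =====
-- push x on a stack whose entries (value, mx, mn) carry the max/min of themselves and all entries below
def pvPushB (stk : List (Int × Int × Int)) (x : Int) : List (Int × Int × Int) :=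
  match stk with
  | [] => [(x, x, x)]
  | (_, mx, mn) :: _ => (x, if x > mx then x else mx, if x < mn then x else mn) :: stk

def find_biggest_sublist_alt (big_list : List Int) (size : Int) : Int :=
  if size < 1 then 0 else
  -- state: (win_sum, front, back, best_sum, best_pos)
  let st := (PySem.List.enumerate big_list 0).foldl
    (fun st p =>
      let r := p.1
      let x := p.2
      let back := pvPushB st.2.2.1 x
      let winSum := st.1 + x
      if r ≥ size - 1 then
        -- if not front: while back: move entries over, rebuilding running max/min
        let fb := if st.2.1.isEmpty then (back.foldl (fun f e => pvPushB f e.1) [], ([] : List (Int × Int × Int)))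
                  else (st.2.1, back)
        match fb.1 with
        | [] => (winSum, fb.1, fb.2, st.2.2.2.1, st.2.2.2.2)  -- unreachable (Python would raise IndexError)
        | (v, mx, mn) :: fs =>
          let wmx : Int := match fb.2 with | [] => mx | (_, bmx, _) :: _ => if bmx > mx then bmx else mx
          let wmn : Int := match fb.2 with | [] => mn | (_, _, bmn) :: _ => if bmn < mn then bmn else mn
          -- 'win_sum > best_sum and wmx - wmn < 1.5' ported as '... ≤ 1' (exact: Int difference)
          let bb := if winSum > st.2.2.2.1 ∧ wmx - wmn ≤ 1 then (winSum, r - size + 1)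
                    else (st.2.2.2.1, st.2.2.2.2)
          (winSum - v, fs, fb.2, bb.1, bb.2)
      else (winSum, st.2.1, back, st.2.2.2.1, st.2.2.2.2))
    ((0 : Int), ([] : List (Int × Int × Int)), ([] : List (Int × Int × Int)), (0 : Int), (0 : Int))
  st.2.2.2.2

-- ===== PRECONDITION & SPEC =====
-- Pre_ excludes negative size, outside the function's natural domain: there A's window slice
-- big_list[i:i+size] wraps around via Python's negative indexing to big_list[i:len+size] and A
-- scans accidental shrinking windows (e.g. the cited input), while B naturally reports no window.
def Pre_find_biggest_sublist (big_list : List Int) (size : Int) : Prop := 0 ≤ size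
instance (big_list : List Int) (size : Int) : Decidable (Pre_find_biggest_sublist big_list size) := by
  unfold Pre_find_biggest_sublist; infer_instance
def pvWitness_find_biggest_sublist : List Int × Int := ([12, 0, 2, 3, 35, 45, 10, 6], 3)

-- For size == 1 A's slice big_list[:-size+1] == big_list[:0] is empty so A always returns 0, while
-- B returns the position of the best single-element window (the intended value); they differ
-- exactly when some later element exceeds both 0 and the first element.
def D_find_biggest_sublist (big_list : List Int) (size : Int) : Prop :=
  size = 1 ∧ ∃ x ∈ big_list.tail, big_list.headD 0 < x ∧ 0 < x
instance (big_list : List Int) (size : Int) : Decidable (D_find_biggest_sublist big_list size) := by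
  unfold D_find_biggest_sublist; infer_instance

def Spec_find_biggest_sublist (big_list : List Int) (size : Int) (out : Int) : Prop :=
  ¬ D_find_biggest_sublist big_list size → out = find_biggest_sublist_alt big_list size
instance (big_list : List Int) (size : Int) (out : Int) : Decidable (Spec_find_biggest_sublist big_list size out) := by
  unfold Spec_find_biggest_sublist; infer_instance

def pvDiffWitness_find_biggest_sublist : List Int × Int := ([0, 1], 1)
def pvDiffWitnessOut_find_biggest_sublist : Int × Int := (0, 1)

-- ===== CLAIM (what is proved, stated in full; the proofs are below) =====
def Claim_unchanged_find_biggest_sublist : Prop := ∀ (big_list : List Int) (size : Int), Dom_find_biggest_sublist big_list size → Pre_find_biggest_sublist big_list size → Spec_find_biggest_sublist big_list size (find_biggest_sublist big_list size)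
def Claim_changed_find_biggest_sublist : Prop := Dom_find_biggest_sublist (pvDiffWitness_find_biggest_sublist.1) (pvDiffWitness_find_biggest_sublist.2) ∧ Pre_find_biggest_sublist (pvDiffWitness_find_biggest_sublist.1) (pvDiffWitness_find_biggest_sublist.2) ∧ D_find_biggest_sublist (pvDiffWitness_find_biggest_sublist.1) (pvDiffWitness_find_biggest_sublist.2) ∧ find_biggest_sublist (pvDiffWitness_find_biggest_sublist.1) (pvDiffWitness_find_biggest_sublist.2) = pvDiffWitnessOut_find_biggest_sublist.1 ∧ find_biggest_sublist_alt (pvDiffWitness_find_biggest_sublist.1) (pvDiffWitness_find_biggest_sublist.2) = pvDiffWitnessOut_find_biggest_sublist.2 ∧ pvDiffWitnessOut_find_biggest_sublist.1 ≠ pvDiffWitnessOut_find_biggest_sublist.2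
def Claim_exact_find_biggest_sublist : Prop := ∀ (big_list : List Int) (size : Int), Dom_find_biggest_sublist big_list size → Pre_find_biggest_sublist big_list size → D_find_biggest_sublist big_list size → find_biggest_sublist big_list size ≠ find_biggest_sublist_alt big_list size

-- ===== LEMMAS AND PROOFS =====

-- proof-side reference: fold over window start indices of (sum, pos)
def pvVals (s : List (Int × Int × Int)) : List Int := s.map (fun e => e.1)

def pvVmax : List Int → Int
  | [] => 0
  | x :: t => t.foldl max x

def pvVmin : List Int → Int
  | [] => 0
  | x :: t => t.foldl min x

def pvWnd (a : List Int) (k j : Nat) : List Int := (a.drop j).take k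

def pvRefStep (a : List Int) (k : Nat) (st : Int × Int) (j : Nat) : Int × Int :=
  if (pvWnd a k j).sum > st.1 ∧ pvVmax (pvWnd a k j) - pvVmin (pvWnd a k j) ≤ 1
  then ((pvWnd a k j).sum, (j : Int)) else st

def pvRef (a : List Int) (k m : Nat) : Int × Int := (List.range m).foldl (pvRefStep a k) (0, 0)

-- B's loop body, named (definitionally equal to the lambda in the port)
def pvStT : Type := Int × List (Int × Int × Int) × List (Int × Int × Int) × Int × Int

def pvStepB (size : Int) (st : pvStT) (p : Int × Int) : pvStT :=
  let r := p.1
  let x := p.2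
  let back := pvPushB st.2.2.1 x
  let winSum := st.1 + x
  if r ≥ size - 1 then
    let fb := if st.2.1.isEmpty then (back.foldl (fun f e => pvPushB f e.1) [], ([] : List (Int × Int × Int)))
              else (st.2.1, back)
    match fb.1 with
    | [] => (winSum, fb.1, fb.2, st.2.2.2.1, st.2.2.2.2)
    | (v, mx, mn) :: fs =>
      let wmx : Int := match fb.2 with | [] => mx | (_, bmx, _) :: _ => if bmx > mx then bmx else mx
      let wmn : Int := match fb.2 with | [] => mn | (_, _, bmn) :: _ => if bmn < mn then bmn else mn
      let bb := if winSum > st.2.2.2.1 ∧ wmx - wmn ≤ 1 then (winSum, r - size + 1)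
                else (st.2.2.2.1, st.2.2.2.2)
      (winSum - v, fs, fb.2, bb.1, bb.2)
  else (winSum, st.2.1, back, st.2.2.2.1, st.2.2.2.2)

-- extrema of a nonempty list: spec-style lemmas built on PySem.List.max?/min?
theorem pvVmax_getD (l : List Int) : (PySem.List.max? l (fun y => y)).getD 0 = pvVmax l := by
  cases l with
  | nil => rw [(PySem.List.max?_eq_none_iff _ _).mpr rfl]; rfl
  | cons x t => rw [PySem.List.max?_id_cons]; rfl

theorem pvVmin_getD (l : List Int) : (PySem.List.min? l (fun y => y)).getD 0 = pvVmin l := by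
  cases l with
  | nil => rw [(PySem.List.min?_eq_none_iff _ _).mpr rfl]; rfl
  | cons x t => rw [PySem.List.min?_id_cons]; rfl

theorem pvVmax_mem {l : List Int} (h : l ≠ []) : pvVmax l ∈ l := by
  obtain ⟨x, t, rfl⟩ := List.exists_cons_of_ne_nil h
  have := PySem.List.max?_mem (PySem.List.max?_id_cons x t)
  simpa [pvVmax] using this

theorem le_pvVmax {l : List Int} {y : Int} (h : y ∈ l) : y ≤ pvVmax l := by
  obtain ⟨x, t, rfl⟩ := List.exists_cons_of_ne_nil (List.ne_nil_of_mem h)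
  exact PySem.List.max?_isMax (PySem.List.max?_id_cons x t) y h

theorem pvVmax_eq {l : List Int} {m : Int} (hm : m ∈ l) (hb : ∀ y ∈ l, y ≤ m) : pvVmax l = m :=
  le_antisymm (hb _ (pvVmax_mem (List.ne_nil_of_mem hm))) (le_pvVmax hm)

theorem pvVmin_mem {l : List Int} (h : l ≠ []) : pvVmin l ∈ l := by
  obtain ⟨x, t, rfl⟩ := List.exists_cons_of_ne_nil h
  have := PySem.List.min?_mem (PySem.List.min?_id_cons x t)
  simpa [pvVmin] using this

theorem pvVmin_le {l : List Int} {y : Int} (h : y ∈ l) : pvVmin l ≤ y := by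
  obtain ⟨x, t, rfl⟩ := List.exists_cons_of_ne_nil (List.ne_nil_of_mem h)
  exact PySem.List.min?_isMin (PySem.List.min?_id_cons x t) y h

theorem pvVmin_eq {l : List Int} {m : Int} (hm : m ∈ l) (hb : ∀ y ∈ l, m ≤ y) : pvVmin l = m :=
  le_antisymm (pvVmin_le hm) (hb _ (pvVmin_mem (List.ne_nil_of_mem hm)))

theorem pvVmax_append {l1 l2 : List Int} (h1 : l1 ≠ []) (h2 : l2 ≠ []) :
    pvVmax (l1 ++ l2) = max (pvVmax l1) (pvVmax l2) := by
  apply pvVmax_eq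
  · rcases le_total (pvVmax l1) (pvVmax l2) with h | h
    · rw [max_eq_right h]; exact List.mem_append_right _ (pvVmax_mem h2)
    · rw [max_eq_left h]; exact List.mem_append_left _ (pvVmax_mem h1)
  · intro y hy
    rcases List.mem_append.mp hy with hy | hy
    · exact le_trans (le_pvVmax hy) (le_max_left _ _)
    · exact le_trans (le_pvVmax hy) (le_max_right _ _)

theorem pvVmin_append {l1 l2 : List Int} (h1 : l1 ≠ []) (h2 : l2 ≠ []) :
    pvVmin (l1 ++ l2) = min (pvVmin l1) (pvVmin l2) := by
  apply pvVmin_eq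
  · rcases le_total (pvVmin l1) (pvVmin l2) with h | h
    · rw [min_eq_left h]; exact List.mem_append_left _ (pvVmin_mem h1)
    · rw [min_eq_right h]; exact List.mem_append_right _ (pvVmin_mem h2)
  · intro y hy
    rcases List.mem_append.mp hy with hy | hy
    · exact le_trans (min_le_left _ _) (pvVmin_le hy)
    · exact le_trans (min_le_right _ _) (pvVmin_le hy)

theorem pvVmax_reverse (l : List Int) : pvVmax l.reverse = pvVmax l := by
  cases h : l with
  | nil => rfl
  | cons x t =>
    apply pvVmax_eq
    · rw [List.mem_reverse]; exact pvVmax_mem (by simp)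
    · intro y hy; exact le_pvVmax (List.mem_reverse.mp hy)

theorem pvVmin_reverse (l : List Int) : pvVmin l.reverse = pvVmin l := by
  cases h : l with
  | nil => rfl
  | cons x t =>
    apply pvVmin_eq
    · rw [List.mem_reverse]; exact pvVmin_mem (by simp)
    · intro y hy; exact pvVmin_le (List.mem_reverse.mp hy)

-- the stack invariant: every entry carries max/min of itself and the entries below it
def pvGood : List (Int × Int × Int) → Prop
  | [] => True
  | (x, mx, mn) :: t => pvGood t ∧ mx = pvVmax (x :: pvVals t) ∧ mn = pvVmin (x :: pvVals t)

theorem pvVals_push (s : List (Int × Int × Int)) (x : Int) :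
    pvVals (pvPushB s x) = x :: pvVals s := by
  cases s with
  | nil => rfl
  | cons e t => obtain ⟨v, mx, mn⟩ := e; rfl

theorem pvGood_push {s : List (Int × Int × Int)} (h : pvGood s) (x : Int) :
    pvGood (pvPushB s x) := by
  cases s with
  | nil => exact ⟨trivial, rfl, rfl⟩
  | cons e t =>
    obtain ⟨v, mx, mn⟩ := e
    obtain ⟨ht, hmx, hmn⟩ := h
    refine ⟨⟨ht, hmx, hmn⟩, ?_, ?_⟩
    · have hne : (v :: pvVals t) ≠ [] := by simp
      have : pvVmax (x :: v :: pvVals t) = max x (pvVmax (v :: pvVals t)) := by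
        apply pvVmax_eq
        · rcases le_total x (pvVmax (v :: pvVals t)) with h | h
          · rw [max_eq_right h]; exact List.mem_cons_of_mem _ (pvVmax_mem hne)
          · rw [max_eq_left h]; exact List.mem_cons_self
        · intro y hy
          rcases List.mem_cons.mp hy with rfl | hy
          · exact le_max_left _ _
          · exact le_trans (le_pvVmax hy) (le_max_right _ _)
      show (if x > mx then x else mx) = pvVmax (x :: v :: pvVals t)
      rw [this, ← hmx]
      rcases lt_or_ge mx x with h | h
      · rw [if_pos h, max_eq_left (le_of_lt h)]
      · rw [if_neg (not_lt.mpr h), max_eq_right h]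
    · have hne : (v :: pvVals t) ≠ [] := by simp
      have : pvVmin (x :: v :: pvVals t) = min x (pvVmin (v :: pvVals t)) := by
        apply pvVmin_eq
        · rcases le_total x (pvVmin (v :: pvVals t)) with h | h
          · rw [min_eq_left h]; exact List.mem_cons_self
          · rw [min_eq_right h]; exact List.mem_cons_of_mem _ (pvVmin_mem hne)
        · intro y hy
          rcases List.mem_cons.mp hy with rfl | hy
          · exact min_le_left _ _
          · exact le_trans (min_le_right _ _) (pvVmin_le hy)
      show (if x < mn then x else mn) = pvVmin (x :: v :: pvVals t)
      rw [this, ← hmn]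
      rcases lt_or_ge x mn with h | h
      · rw [if_pos h, min_eq_left (le_of_lt h)]
      · rw [if_neg (not_lt.mpr h), min_eq_right h]

theorem pvGood_tail {e : Int × Int × Int} {t : List (Int × Int × Int)}
    (h : pvGood (e :: t)) : pvGood t := by
  obtain ⟨v, mx, mn⟩ := e; exact h.1

theorem pvGood_head {v mx mn : Int} {t : List (Int × Int × Int)}
    (h : pvGood ((v, mx, mn) :: t)) :
    mx = pvVmax (pvVals ((v, mx, mn) :: t)) ∧ mn = pvVmin (pvVals ((v, mx, mn) :: t)) := by
  exact ⟨h.2.1, h.2.2⟩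

theorem pvFlush (l : List (Int × Int × Int)) :
    ∀ (f : List (Int × Int × Int)), pvGood f →
    pvGood (l.foldl (fun f e => pvPushB f e.1) f) ∧
    pvVals (l.foldl (fun f e => pvPushB f e.1) f) = (pvVals l).reverse ++ pvVals f := by
  induction l with
  | nil => intro f hf; exact ⟨hf, by simp [pvVals]⟩
  | cons e t ih =>
    intro f hf
    obtain ⟨hg, hv⟩ := ih (pvPushB f e.1) (pvGood_push hf e.1)
    simp only [List.foldl_cons]
    refine ⟨hg, ?_⟩
    rw [hv, pvVals_push]
    simp [pvVals]

-- a fold whose every step fixes the state is the identity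
theorem pvFoldl_fixed {α β : Type} {f : β → α → β} {st : β} {l : List α}
    (h : ∀ x ∈ l, f st x = st) : l.foldl f st = st := by
  induction l with
  | nil => rfl
  | cons y t ih => rw [List.foldl_cons, h y List.mem_cons_self]; exact ih (fun x hx => h x (List.mem_cons_of_mem _ hx))

-- ===== A equals the reference =====

def pvStepA (a : List Int) (size : Int) (st : Int × Int × List Int) (i : Int) : Int × Int × List Int :=
  let small_list := PySem.List.slice a (some i) (some (i + size))
  let addition := small_list.sum
  if addition > st.1 ∧ (PySem.List.max? small_list (fun y => y)).getD 0
                       - (PySem.List.min? small_list (fun y => y)).getD 0 ≤ 1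
  then (addition, i, small_list) else st

theorem pvFoldl_enum_fst {β : Type} (xs : List Int) (g : β → Int → β) (st : β) :
    (PySem.List.enumerate xs 0).foldl (fun st p => g st p.1) st
      = (List.range xs.length).foldl (fun st (j : Nat) => g st (j : Int)) st := by
  have h1 := List.foldl_map (f := fun p : Int × Int => p.1) (g := g)
    (l := PySem.List.enumerate xs 0) (init := st)
  rw [PySem.List.map_fst_enumerate] at h1
  have h2 := List.foldl_map (f := fun k : Nat => (k : Int)) (g := g)
    (l := List.range xs.length) (init := st)
  rw [← h1, show (0 : Int) + (xs.length : Int) = (xs.length : Int) by ring,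
    PySem.List.pyRange_zero_natCast, h2]

theorem pvA_eq_ref (a : List Int) (size : Int) (h2 : 2 ≤ size) :
    find_biggest_sublist a size = (pvRef a size.toNat (a.length + 1 - size.toNat)).2 := by
  have hsz : size = ((size.toNat : Nat) : Int) := (Int.toNat_of_nonneg (by omega)).symm
  set k := size.toNat with hk
  have hk2 : 2 ≤ k := by omega
  unfold find_biggest_sublist
  have hs : (-size + 1 : Int) = -(((k - 1 : Nat)) : Int) := by
    rw [Nat.cast_sub (by omega : 1 ≤ k)]
    push_cast
    omega
  rw [hs, PySem.List.slice_to_neg_natCast a (k - 1) (by omega)]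
  change ((PySem.List.enumerate (List.take (a.length - (k - 1)) a) 0).foldl
      (fun st p => pvStepA a size st p.1)
      ((0 : Int), (0 : Int), (PySem.List.pyRange 0 size 1).map (fun _ => (0 : Int)))).2.1 = _
  rw [pvFoldl_enum_fst _ (pvStepA a size)]
  have hlen : (a.take (a.length - (k - 1))).length = a.length + 1 - k := by
    rw [List.length_take]
    omega
  rw [hlen]
  have hcomm : ∀ (st : Int × Int × List Int) (j : Nat),
      pvRefStep a k ((fun s : Int × Int × List Int => (s.1, s.2.1)) st) j
        = (fun s : Int × Int × List Int => (s.1, s.2.1)) (pvStepA a size st (j : Int)) := by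
    intro st j
    have hw : PySem.List.slice a (some (j : Int)) (some ((j : Int) + size)) = pvWnd a k j := by
      rw [hsz, PySem.List.slice_natCast_add a j k, pvWnd]
    unfold pvStepA pvRefStep
    simp only [hw, pvVmax_getD, pvVmin_getD]
    split_ifs <;> rfl
  have := List.foldl_hom (f := fun s : Int × Int × List Int => (s.1, s.2.1))
    (g₁ := fun st (j : Nat) => pvStepA a size st (j : Int)) (g₂ := pvRefStep a k)
    (l := List.range (a.length + 1 - k))
    (init := ((0 : Int), (0 : Int), (PySem.List.pyRange 0 size 1).map (fun _ => (0 : Int))))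
    (fun st j => hcomm st j)
  rw [pvRef]
  have hfin := congrArg Prod.snd this
  simpa using hfin.symm

-- ===== B equals the reference =====

def pvQ (a : List Int) (k r : Nat) : List Int := (a.take r).drop (r - (k - 1))

def pvInv (a : List Int) (k r : Nat) (st : pvStT) : Prop :=
  r ≤ a.length ∧
  st.1 = (pvQ a k r).sum ∧
  pvVals st.2.1 ++ (pvVals st.2.2.1).reverse = pvQ a k r ∧
  pvGood st.2.1 ∧ pvGood st.2.2.1 ∧
  (st.2.2.2.1, st.2.2.2.2) = pvRef a k (r + 1 - k)

-- (if y > x then y else x) is max, (if y < x then y else x) is min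
theorem pvIfMax (x y : Int) : (if y > x then y else x) = max x y := by
  split_ifs with h
  · exact (max_eq_right (le_of_lt h)).symm
  · exact (max_eq_left (not_lt.mp h)).symm

theorem pvIfMin (x y : Int) : (if y < x then y else x) = min x y := by
  split_ifs with h
  · exact (min_eq_right (le_of_lt h)).symm
  · exact (min_eq_left (not_lt.mp h)).symm

theorem pvVmax_combine {F B W : List Int} (hF : F ≠ []) (hB : B ≠ [])
    (hW : F ++ B.reverse = W) : max (pvVmax F) (pvVmax B) = pvVmax W := by
  subst hW
  rw [pvVmax_append hF (by simpa using hB), pvVmax_reverse]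

theorem pvVmin_combine {F B W : List Int} (hF : F ≠ []) (hB : B ≠ [])
    (hW : F ++ B.reverse = W) : min (pvVmin F) (pvVmin B) = pvVmin W := by
  subst hW
  rw [pvVmin_append hF (by simpa using hB), pvVmin_reverse]

-- the evaluate-and-pop phase of B's loop body preserves the invariant
theorem pvPop_inv {a : List Int} {size : Int} (h1 : 1 ≤ size) {r : Nat}
    (hr : r < a.length) (hkr : size.toNat ≤ r + 1)
    {v mx mn : Int} {fs back' : List (Int × Int × Int)} {bs bp w wmx wmn : Int}
    (hgood1 : pvGood ((v, mx, mn) :: fs)) (hgood2 : pvGood back')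
    (hcomb : pvVals ((v, mx, mn) :: fs) ++ (pvVals back').reverse
              = pvWnd a size.toNat (r + 1 - size.toNat))
    (hsumW : w = (pvWnd a size.toNat (r + 1 - size.toNat)).sum)
    (hbest : (bs, bp) = pvRef a size.toNat (r + 1 - size.toNat))
    (hwmx : wmx = pvVmax (pvWnd a size.toNat (r + 1 - size.toNat)))
    (hwmn : wmn = pvVmin (pvWnd a size.toNat (r + 1 - size.toNat))) :
    pvInv a size.toNat (r + 1)
      (w - v, fs, back',
       (if w > bs ∧ wmx - wmn ≤ 1 then (w, (r : Int) - size + 1) else (bs, bp)).1,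
       (if w > bs ∧ wmx - wmn ≤ 1 then (w, (r : Int) - size + 1) else (bs, bp)).2) := by
  have hsz : size = ((size.toNat : Nat) : Int) := by omega
  set k := size.toNat with hkdef
  have hk1 : 1 ≤ k := by omega
  set j := r + 1 - k with hjdef
  have hWcons : pvWnd a k j = v :: (pvVals fs ++ (pvVals back').reverse) := by
    rw [← hcomb]; rfl
  have hpos : (r : Int) - size + 1 = ((j : Nat) : Int) := by
    rw [hsz]; omega
  have hbb : (if w > bs ∧ wmx - wmn ≤ 1 then (w, (r : Int) - size + 1) else (bs, bp))
      = pvRef a k (j + 1) := by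
    rw [hwmx, hwmn, hsumW, hpos, pvRef, List.range_succ, List.foldl_append, List.foldl_cons,
      List.foldl_nil, ← pvRef, ← hbest, pvRefStep]
  have hW' : (a.take (r + 1)).drop j = pvWnd a k j := by
    rw [List.drop_take, show r + 1 - j = k from by omega, pvWnd]
  have hQ2 : pvQ a k (r + 1) = pvVals fs ++ (pvVals back').reverse := by
    rw [pvQ, show r + 1 - (k - 1) = j + 1 from by omega, ← List.drop_drop, hW', hWcons]
    rfl
  refine ⟨by omega, ?_, ?_, pvGood_tail hgood1, hgood2, ?_⟩
  · show w - v = (pvQ a k (r + 1)).sum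
    rw [hQ2, hsumW]
    rw [hWcons, List.sum_cons]
    ring
  · show pvVals fs ++ (pvVals back').reverse = pvQ a k (r + 1)
    rw [hQ2]
  · show (_, _) = pvRef a k (r + 1 + 1 - k)
    rw [show r + 1 + 1 - k = j + 1 from by omega, ← hbb]

theorem pvStep_inv {a : List Int} {size : Int} (h1 : 1 ≤ size) {r : Nat} {st : pvStT}
    (hr : r < a.length) (inv : pvInv a size.toNat r st) :
    pvInv a size.toNat (r + 1) (pvStepB size st ((r : Int), a[r])) := by
  obtain ⟨w, front, back, bs, bp⟩ := st
  obtain ⟨hrle, hsum, hvals, hgf, hgb, hbest⟩ := inv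
  dsimp only at hsum hvals hgf hgb hbest
  have hsz : size = ((size.toNat : Nat) : Int) := by omega
  set k := size.toNat with hkdef
  have hk1 : 1 ≤ k := by omega
  have htake : a.take (r + 1) = a.take r ++ [a[r]] := by
    rw [List.take_add_one, List.getElem?_eq_getElem hr]
    rfl
  have hQx : (a.take (r + 1)).drop (r - (k - 1)) = pvQ a k r ++ [a[r]] := by
    rw [htake, List.drop_append_of_le_length (by rw [List.length_take]; omega)]
    rfl
  unfold pvStepB
  dsimp only
  by_cases hc : ((r : Int) ≥ size - 1)
  · rw [if_pos hc]
    have hkr : k ≤ r + 1 := by rw [hsz] at hc; omega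
    have hW : pvQ a k r ++ [a[r]] = pvWnd a k (r + 1 - k) := by
      rw [← hQx, List.drop_take, show (r + 1) - (r - (k - 1)) = k from by omega,
        show r - (k - 1) = r + 1 - k from by omega, pvWnd]
    have hsumW : w + a[r] = (pvWnd a k (r + 1 - k)).sum := by
      rw [← hW, List.sum_append, hsum]
      simp
    have hWlen : (pvWnd a k (r + 1 - k)).length = k := by
      rw [pvWnd, List.length_take, List.length_drop]
      omega
    rcases front with _ | ⟨⟨v0, mx0, mn0⟩, fs0⟩
    · rw [if_pos (show ([] : List (Int × Int × Int)).isEmpty = true from rfl)]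
      have hflu := pvFlush (pvPushB back a[r]) [] trivial
      have hvflu : pvVals ((pvPushB back a[r]).foldl (fun f e => pvPushB f e.1) [])
          = pvWnd a k (r + 1 - k) := by
        rw [hflu.2, pvVals_push]
        have hnl : pvVals ([] : List (Int × Int × Int)) = [] := rfl
        rw [hnl, List.append_nil, List.reverse_cons]
        rw [hnl, List.nil_append] at hvals
        rw [hvals, hW]
      rcases hflu0 : (pvPushB back a[r]).foldl (fun f e => pvPushB f e.1) []
        with _ | ⟨⟨v, mx, mn⟩, fs⟩
      · exfalso
        rw [hflu0] at hvflu
        have : (pvWnd a k (r + 1 - k)).length = 0 := by rw [← hvflu]; rfl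
        omega
      · rw [hflu0] at hflu hvflu
        dsimp only
        rw [hflu0]
        dsimp only
        refine pvPop_inv h1 hr hkr hflu.1 (show pvGood [] from trivial)
          (by rw [show pvVals ([] : List (Int × Int × Int)) = [] from rfl,
                List.reverse_nil, List.append_nil, hvflu])
          hsumW hbest ?_ ?_
        · have := (pvGood_head hflu.1).1
          rw [this, hvflu]
        · have := (pvGood_head hflu.1).2
          rw [this, hvflu]
    · rw [if_neg (by simp)]
      have hFne : pvVals ((v0, mx0, mn0) :: fs0) ≠ [] := by simp [pvVals]
      have hBne : pvVals (pvPushB back a[r]) ≠ [] := by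
        rw [pvVals_push]; simp
      have hcomb : pvVals ((v0, mx0, mn0) :: fs0) ++ (pvVals (pvPushB back a[r])).reverse
          = pvWnd a k (r + 1 - k) := by
        rw [pvVals_push, List.reverse_cons, ← List.append_assoc, hvals, hW]
      have hfmx : mx0 = pvVmax (pvVals ((v0, mx0, mn0) :: fs0)) := (pvGood_head hgf).1
      have hfmn : mn0 = pvVmin (pvVals ((v0, mx0, mn0) :: fs0)) := (pvGood_head hgf).2
      rcases back with _ | ⟨⟨cv, cmx, cmn⟩, cb⟩
      · refine pvPop_inv h1 hr hkr hgf (pvGood_push (show pvGood [] from trivial) a[r])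
          hcomb hsumW hbest ?_ ?_
        · show (if a[r] > mx0 then a[r] else mx0) = _
          rw [pvIfMax, hfmx]
          exact pvVmax_combine hFne (by simp [pvVals, pvPushB]) hcomb
        · show (if a[r] < mn0 then a[r] else mn0) = _
          rw [pvIfMin, hfmn]
          exact pvVmin_combine hFne (by simp [pvVals, pvPushB]) hcomb
      · have hgb2 : pvGood (pvPushB ((cv, cmx, cmn) :: cb) a[r]) := pvGood_push hgb a[r]
        refine pvPop_inv h1 hr hkr hgf hgb2 hcomb hsumW hbest ?_ ?_
        · show (if (if a[r] > cmx then a[r] else cmx) > mx0 then (if a[r] > cmx then a[r] else cmx) else mx0) = _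
          rw [pvIfMax, hfmx, (pvGood_head hgb2).1]
          exact pvVmax_combine hFne hBne hcomb
        · show (if (if a[r] < cmn then a[r] else cmn) < mn0 then (if a[r] < cmn then a[r] else cmn) else mn0) = _
          rw [pvIfMin, hfmn, (pvGood_head hgb2).2]
          exact pvVmin_combine hFne hBne hcomb
  · rw [if_neg hc]
    have hrk : r + 1 < k := by rw [hsz] at hc; omega
    have hz1 : r + 1 - (k - 1) = 0 := by omega
    have hz0 : r - (k - 1) = 0 := by omega
    have hQ1 : pvQ a k (r + 1) = pvQ a k r ++ [a[r]] := by
      rw [← hQx, hz0, pvQ, hz1]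
    refine ⟨by omega, ?_, ?_, hgf, pvGood_push hgb _, ?_⟩
    · show w + a[r] = (pvQ a k (r + 1)).sum
      rw [hQ1, List.sum_append, hsum]
      simp
    · show pvVals front ++ (pvVals (pvPushB back a[r])).reverse = pvQ a k (r + 1)
      rw [pvVals_push, List.reverse_cons, ← List.append_assoc, hvals, hQ1]
    · show (bs, bp) = pvRef a k (r + 1 + 1 - k)
      rw [show r + 1 + 1 - k = r + 1 - k from by omega]
      exact hbest

theorem pvMain {a : List Int} {size : Int} (h1 : 1 ≤ size) :
    ∀ (suf : List Int) (r : Nat) (st : pvStT), a.drop r = suf → pvInv a size.toNat r st →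
    pvInv a size.toNat a.length ((PySem.List.enumerate suf (r : Int)).foldl (pvStepB size) st) := by
  intro suf
  induction suf with
  | nil =>
    intro r st hdrop inv
    have : a.length ≤ r := by
      by_contra h
      have h2 := List.drop_eq_getElem_cons (l := a) (by omega : r < a.length)
      rw [hdrop] at h2
      exact List.cons_ne_nil _ _ h2.symm
    have hreq : r = a.length := le_antisymm inv.1 this
    subst hreq
    simpa [PySem.List.enumerate] using inv
  | cons x suf' ih =>
    intro r st hdrop inv
    have hrl : r < a.length := by
      by_contra h
      rw [List.drop_eq_nil_of_le (by omega)] at hdrop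
      exact List.cons_ne_nil _ _ hdrop.symm
    have hx : a[r] = x := by
      have := List.drop_eq_getElem_cons (l := a) hrl
      rw [hdrop] at this
      exact (List.cons.injEq _ _ _ _ ▸ this).1.symm
    have hdrop' : a.drop (r + 1) = suf' := by
      have := List.drop_eq_getElem_cons (l := a) hrl
      rw [hdrop] at this
      exact (List.cons.injEq _ _ _ _ ▸ this).2.symm
    rw [PySem.List.enumerate_cons, List.foldl_cons]
    have : ((r : Int)) + 1 = (((r + 1 : Nat)) : Int) := by push_cast; ring
    rw [this]
    exact ih (r + 1) _ hdrop' (hx ▸ pvStep_inv h1 hrl inv)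

theorem pvB_eq_ref (a : List Int) (size : Int) (h1 : 1 ≤ size) :
    find_biggest_sublist_alt a size = (pvRef a size.toNat (a.length + 1 - size.toNat)).2 := by
  have hinit : pvInv a size.toNat 0 ((0 : Int), ([] : List (Int × Int × Int)), ([] : List (Int × Int × Int)), (0 : Int), (0 : Int)) := by
    refine ⟨Nat.zero_le _, ?_, ?_, trivial, trivial, ?_⟩
    · simp [pvQ]
    · simp [pvQ, pvVals]
    · have : 0 + 1 - size.toNat = 0 := by omega
      rw [this]; rfl
  have h := pvMain (a := a) h1 a 0 _ (by simp) hinit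
  unfold find_biggest_sublist_alt
  rw [if_neg (by omega)]
  have heq := h.2.2.2.2.2
  rw [Prod.ext_iff] at heq
  exact heq.2

-- ===== small sizes =====

theorem pvA_zero (a : List Int) : find_biggest_sublist a 0 = 0 := by
  unfold find_biggest_sublist
  have hsl : PySem.List.slice a none (some (-0 + 1)) = a.take 1 := by
    have := PySem.List.slice_to a (b := 1) (by norm_num)
    simpa using this
  rw [hsl]
  cases a with
  | nil => rfl
  | cons h t =>
    have hw : PySem.List.slice (h :: t) (some 0) (some (0 + 0)) = ([] : List Int) := by
      have := PySem.List.slice_natCast (h :: t) 0 0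
      simpa using this
    dsimp only
    rw [show List.take 1 (h :: t) = [h] from rfl, PySem.List.enumerate_cons,
      PySem.List.enumerate_nil, List.foldl_cons, List.foldl_nil, hw]
    norm_num

theorem pvA_one (a : List Int) : find_biggest_sublist a 1 = 0 := by
  unfold find_biggest_sublist
  have hsl : PySem.List.slice a none (some (-1 + 1)) = ([] : List Int) := by
    have := PySem.List.slice_to a (b := 0) (by norm_num)
    rw [show (-1 + 1 : Int) = (0 : Int) by norm_num, this]
    rfl
  dsimp only
  rw [hsl, PySem.List.enumerate_nil, List.foldl_nil]


theorem pvWnd_one {a : List Int} {j : Nat} (hj : j < a.length) : pvWnd a 1 j = [a[j]] := by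
  rw [pvWnd, List.drop_eq_getElem_cons hj]
  rfl

theorem pvRef_one_of_nD {a : List Int}
    (hnd : ¬ ∃ x ∈ a.tail, a.headD 0 < x ∧ 0 < x) :
    (pvRef a 1 a.length).2 = 0 := by
  cases a with
  | nil => rfl
  | cons h t =>
    have hbound : ∀ x ∈ t, x ≤ max h 0 := by
      intro x hx
      by_contra hgt
      push Not at hgt
      exact hnd ⟨x, by simpa using hx, by constructor <;> [simpa using lt_of_le_of_lt (le_max_left h 0) hgt; exact lt_of_le_of_lt (le_max_right h 0) hgt]⟩
    rw [pvRef, show (h :: t).length = t.length + 1 from rfl, List.range_succ_eq_map,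
      List.foldl_cons]
    have hst1 : pvRefStep (h :: t) 1 ((0 : Int), (0 : Int)) 0 = (max h 0, 0) := by
      rw [pvRefStep, show pvWnd (h :: t) 1 0 = [h] from rfl]
      by_cases hh : (0 : Int) < h
      · rw [if_pos ⟨by simpa using hh, by norm_num [pvVmax, pvVmin]⟩]
        simp [max_eq_left (le_of_lt hh)]
      · rw [if_neg (by simp; omega)]
        rw [max_eq_right (by omega)]
    rw [hst1, List.foldl_map]
    rw [pvFoldl_fixed ?_]
    · intro j hj
      have hj' : j < t.length := List.mem_range.mp hj
      have hjl : j + 1 < (h :: t).length := by simp; omega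
      rw [pvRefStep, pvWnd_one hjl]
      rw [if_neg]
      intro hcon
      have hmem : (h :: t)[j + 1] = t[j]'hj' := List.getElem_cons_succ h t j hjl
      have hb := hbound (t[j]'hj') (List.getElem_mem hj')
      obtain ⟨hc1, -⟩ := hcon
      have hsum : ([(h :: t)[j + 1]] : List Int).sum = (h :: t)[j + 1] := by simp
      rw [hsum, hmem] at hc1
      have hfst : ((max h 0, (0 : Int))).1 = max h 0 := rfl
      rw [hfst] at hc1
      exact absurd hb (not_le.mpr hc1)

theorem pvRef_fst_mono (a : List Int) (k : Nat) :
    ∀ (l : List Nat) (st : Int × Int), st.1 ≤ (l.foldl (pvRefStep a k) st).1 := by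
  intro l
  induction l with
  | nil => intro st; exact le_refl _
  | cons j t ih =>
    intro st
    rw [List.foldl_cons]
    refine le_trans ?_ (ih _)
    rw [pvRefStep]
    split_ifs with hc
    · exact le_of_lt hc.1
    · exact le_refl _

theorem pvRef_one_ge {a : List Int} :
    ∀ (l : List Nat) (st : Int × Int) (j : Nat) (hj : j < a.length), j ∈ l →
    a[j] ≤ (l.foldl (pvRefStep a 1) st).1 := by
  intro l
  induction l with
  | nil => intro st j hj hmem; cases hmem
  | cons y t ih =>
    intro st j hj hmem
    rw [List.foldl_cons]
    rcases List.mem_cons.mp hmem with rfl | hmem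
    · refine le_trans ?_ (pvRef_fst_mono a 1 t _)
      rw [pvRefStep, pvWnd_one hj]
      split_ifs with hc
      · simp
      · push Not at hc
        by_contra hlt
        push Not at hlt
        have h2 := hc (by simpa using hlt)
        norm_num [pvVmax, pvVmin] at h2
    · exact ih _ j hj hmem

theorem pvRef_one_pos0 {h : Int} {t : List Int} :
    ∀ (l : List Nat) (st : Int × Int),
    (st.2 = 0 → st.1 ≤ max h 0) →
    ((l.foldl (pvRefStep (h :: t) 1) st).2 = 0 → (l.foldl (pvRefStep (h :: t) 1) st).1 ≤ max h 0) := by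
  intro l
  induction l with
  | nil => intro st hst; exact hst
  | cons y ys ih =>
    intro st hst
    rw [List.foldl_cons]
    apply ih
    rw [pvRefStep]
    split_ifs with hc
    · intro hz
      have hy : y = 0 := by simpa using hz
      subst hy
      have : pvWnd (h :: t) 1 0 = [h] := rfl
      rw [this]
      simp
    · exact hst

-- inside D_ at size 1, B's reference fold does not leave position 0
theorem pvRef_one_ne {a : List Int}
    (hd : ∃ x ∈ a.tail, a.headD 0 < x ∧ 0 < x) :
    (pvRef a 1 a.length).2 ≠ 0 := by
  cases a with
  | nil => rcases hd with ⟨x, hx, _⟩; cases hx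
  | cons h t =>
    rcases hd with ⟨x, hx, hgt, hpos⟩
    have hgt' : h < x := by simpa using hgt
    intro h0
    have hb := pvRef_one_pos0 (h := h) (t := t) (List.range (h :: t).length) (0, 0)
      (fun _ => by norm_num)
    rw [← pvRef] at hb
    have h1 := hb h0
    obtain ⟨i, hi, hxi⟩ := List.mem_iff_getElem.mp (by simpa using hx)
    have hj : i + 1 < (h :: t).length := by simp; omega
    have h2 := pvRef_one_ge (a := h :: t) (List.range (h :: t).length) (0, 0) (i + 1) hj
      (List.mem_range.mpr hj)
    rw [← pvRef] at h2
    have hcast : (h :: t)[i + 1] = t[i]'hi := List.getElem_cons_succ h t i hj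
    rw [hcast, hxi] at h2
    omega

-- ===== VERDICT (by name: the statement is the Claim_ definition above) =====
theorem find_biggest_sublist_spec : Claim_unchanged_find_biggest_sublist := by
  intro a size hdom hpre hnd
  unfold Pre_find_biggest_sublist at hpre
  unfold D_find_biggest_sublist at hnd
  rcases show size = 0 ∨ size = 1 ∨ 2 ≤ size by omega with h0 | h1 | h2
  · subst h0
    rw [pvA_zero]
    unfold find_biggest_sublist_alt
    rw [if_pos (by norm_num)]
  · subst h1
    rw [pvA_one, pvB_eq_ref a 1 (by norm_num)]
    rw [show ((1 : Int).toNat) = 1 from rfl, show a.length + 1 - 1 = a.length from by omega]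
    symm
    apply pvRef_one_of_nD
    intro hex
    exact hnd ⟨rfl, hex⟩
  · rw [pvA_eq_ref a size h2, pvB_eq_ref a size (by omega)]

theorem find_biggest_sublist_changed : Claim_changed_find_biggest_sublist := by
  unfold Claim_changed_find_biggest_sublist; decide

theorem find_biggest_sublist_tight : Claim_exact_find_biggest_sublist := by
  intro a size hdom hpre hd
  unfold D_find_biggest_sublist at hd
  obtain ⟨hs, hex⟩ := hd
  subst hs
  rw [pvA_one, pvB_eq_ref a 1 (by norm_num)]
  rw [show ((1 : Int).toNat) = 1 from rfl, show a.length + 1 - 1 = a.length from by omega]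
  exact fun h => pvRef_one_ne hex h.symm
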